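-- pv_equiv track=rewrite | github.com/refrigerator2000/homework_python | Umbrella.py | Umbrella
-- ===== SOURCE A (Python) =====
-- import string
--
-- def Umbrella(BunchWords):
--     result = []
--     for word in BunchWords:
--         NewWord = ''
--         HasPMark = False
--         for ch in string.punctuation:
--             if ch in word:
--                 HasPMark = True
--                 pos = word.find(ch)
--                 if pos == len(word) - 1:
--                     NewWord = word[:pos]
--                 else:
--                     NewWord = word[:pos] + word[pos + 1:]
--         if not HasPMark:
--                NewWord = word
--                result.append(NewWord.lower())
--     return result
-- ===== SOURCE B (Python) =====
-- def Umbrella(BunchWords):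
--     result = []
--     for word in BunchWords:
--         lowered = []
--         clean = True
--         for c in word:
--             if 33 <= ord(c) <= 126 and not c.isalnum():
--                 clean = False
--                 break
--             lowered.append(c.lower())
--         if clean:
--             result.append(''.join(lowered))
--     return result
-- ===== Notes on version B (the rewrite author's own statement) =====
-- stated objective: alternative
-- what changed: Replaces A's per-word loop over the 32-char punctuation alphabet (with dead NewWord/find/slicing bookkeeping) by one fused char-level pass per word that lowercases while classifying each character arithmetically (ASCII code 33-126 and not alphanumeric), breaking out at the first punctuation character.
import Mathlib
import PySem

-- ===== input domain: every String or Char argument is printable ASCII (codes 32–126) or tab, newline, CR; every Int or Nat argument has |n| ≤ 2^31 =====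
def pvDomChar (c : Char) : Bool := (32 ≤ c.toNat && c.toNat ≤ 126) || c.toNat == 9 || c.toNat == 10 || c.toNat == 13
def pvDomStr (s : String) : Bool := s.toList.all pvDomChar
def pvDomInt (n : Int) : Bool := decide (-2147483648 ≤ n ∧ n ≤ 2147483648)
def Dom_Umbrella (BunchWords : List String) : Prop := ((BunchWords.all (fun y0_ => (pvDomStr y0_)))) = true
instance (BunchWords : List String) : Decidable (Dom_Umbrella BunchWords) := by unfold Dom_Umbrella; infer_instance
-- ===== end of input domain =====

-- B replaces A's per-word scan over the punctuation alphabet (with dead NewWord/find/slice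
-- bookkeeping) by one fused char-level pass per word that lowercases while classifying each
-- character arithmetically (ASCII 33-126 and not alphanumeric), with early exit.


-- string.punctuation
def pvPunctuation : List Char := "!\"#$%&'()*+,-./:;<=>?@[\\]^_`{|}~".toList

-- ===== PORT A =====
-- one iteration of A's inner 'for ch in string.punctuation' loop; state = (NewWord, HasPMark)
def pvInnerStep (word : String) (st : String × Bool) (ch : Char) : String × Bool :=
  if PySem.Str.isIn (String.ofList [ch]) word then
    let pos := PySem.Str.find word (String.ofList [ch])
    let NewWord :=
      if pos = PySem.Str.len word - 1 then
        PySem.Str.slice word none (some pos)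
      else
        String.ofList ((PySem.Str.slice word none (some pos)).toList
                   ++ (PySem.Str.slice word (some (pos + 1)) none).toList)
    (NewWord, true)
  else st

def Umbrella (BunchWords : List String) : List String :=
  BunchWords.foldl (fun result word =>
    let st := pvPunctuation.foldl (pvInnerStep word) ("", false)
    if !st.2 then
      let NewWord := word
      result ++ [PySem.Str.lower NewWord]
    else result) []

-- ===== PORT B =====
-- '33 <= ord(c) <= 126 and not c.isalnum()' (exact: Python's c.isalnum() on the ASCII domain
-- is PySem.Chars.isalnum)
def pvIsPunctAlt (c : Char) : Bool :=
  (33 ≤ c.toNat && c.toNat ≤ 126) && !PySem.Chars.isalnum c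

-- B's inner 'for c in word' loop with its break: state = the 'lowered' accumulator;
-- none = the loop broke with clean = False
def pvScan (cs : List Char) (lowered : List Char) : Option (List Char) :=
  match cs with
  | [] => some lowered
  | c :: rest =>
      if pvIsPunctAlt c then none
      else pvScan rest (lowered ++ [PySem.Chars.lowerChar c])

def Umbrella_alt (BunchWords : List String) : List String :=
  BunchWords.foldl (fun result word =>
    match pvScan word.toList [] with
    | some lowered => result ++ [String.ofList lowered]   -- ''.join(lowered)
    | none => result) []

-- ===== PRECONDITION & SPEC =====
def Spec_Umbrella (BunchWords : List String) (out : List String) : Prop := out = Umbrella_alt BunchWords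
instance (BunchWords : List String) (out : List String) : Decidable (Spec_Umbrella BunchWords out) := by unfold Spec_Umbrella; infer_instance

-- ===== CLAIM =====
def Claim_equal_Umbrella : Prop := ∀ (BunchWords : List String), Dom_Umbrella BunchWords → Spec_Umbrella BunchWords (Umbrella BunchWords)

-- ===== LEMMAS AND PROOFS =====

-- a single-character needle is in a string iff the character is one of its characters
theorem pvIsIn_singleton (ch : Char) (word : String) :
    PySem.Str.isIn (String.ofList [ch]) word = true ↔ ch ∈ word.toList := by
  rw [PySem.Str.isIn_iff_infix]
  simpa using List.singleton_infix_iff ch word.toList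

-- the inner loop's HasPMark flag is exactly 'some punctuation char occurs in word'
theorem pvInner_snd (word : String) (l : List Char) (st : String × Bool) :
    (l.foldl (pvInnerStep word) st).2
      = (st.2 || l.any (fun ch => PySem.Str.isIn (String.ofList [ch]) word)) := by
  induction l generalizing st with
  | nil => simp
  | cons c cs ih =>
    rw [List.foldl_cons, ih, List.any_cons]
    by_cases h : PySem.Str.isIn (String.ofList [c]) word = true
    · simp only [PySem.Str.isIn_eq, String.toList_ofList] at h
      simp [pvInnerStep, h]
    · simp only [Bool.not_eq_true, PySem.Str.isIn_eq, String.toList_ofList] at h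
      simp [pvInnerStep, h]

-- on the ASCII domain, B's arithmetic classification coincides with membership in
-- string.punctuation (checked over all 127 relevant code points)
set_option maxRecDepth 4000 in
theorem pvPunct_char (c : Char) (h : pvDomChar c = true) :
    pvIsPunctAlt c = pvPunctuation.contains c := by
  have hlt : c.toNat < 127 := by
    simp only [pvDomChar, Bool.or_eq_true, Bool.and_eq_true, decide_eq_true_eq,
      beq_iff_eq] at h
    omega
  have htab : ∀ n ∈ List.range 127,
      (pvIsPunctAlt (Char.ofNat n) = pvPunctuation.contains (Char.ofNat n)) := by decide
  have := htab c.toNat (List.mem_range.mpr hlt)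
  simpa [Char.ofNat_toNat] using this

-- B's inner loop: result of the scan, characterised
theorem pvScan_eq (cs acc : List Char) :
    pvScan cs acc
      = if cs.all (fun c => !pvIsPunctAlt c) then some (acc ++ cs.map PySem.Chars.lowerChar)
        else none := by
  induction cs generalizing acc with
  | nil => simp [pvScan]
  | cons c rest ih =>
    by_cases h : pvIsPunctAlt c = true
    · simp [pvScan, h]
    · simp only [Bool.not_eq_true] at h
      simp [pvScan, h, ih]

-- the per-word steps of the two outer loops agree on any ASCII word
theorem pvStep_eq (w : String) (hw : pvDomStr w = true) (result : List String) :
    (if !(pvPunctuation.foldl (pvInnerStep w) ("", false)).2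
      then result ++ [PySem.Str.lower w] else result)
    = (match pvScan w.toList [] with
      | some lowered => result ++ [String.ofList lowered]
      | none => result) := by
  simp only [pvDomStr, List.all_eq_true] at hw
  simp only [pvInner_snd, Bool.false_or, pvScan_eq, List.nil_append]
  have hcond : (w.toList.all fun c => !pvIsPunctAlt c)
      = !(pvPunctuation.any fun ch => PySem.Str.isIn (String.ofList [ch]) w) := by
    rw [Bool.eq_iff_iff]
    simp only [List.all_eq_true, Bool.not_eq_true', List.any_eq_false,
      pvIsIn_singleton]
    constructor
    · intro h p hp hpin
      have := h _ hpin
      rw [pvPunct_char _ (hw _ hpin), List.contains_eq_mem,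
        decide_eq_false_iff_not] at this
      exact this hp
    · intro h c hc
      rw [pvPunct_char _ (hw _ hc), List.contains_eq_mem,
        decide_eq_false_iff_not]
      exact fun hmem => h _ hmem hc
  rw [hcond]
  cases hb : (pvPunctuation.any fun ch => PySem.Str.isIn (String.ofList [ch]) w) with
  | true => simp only [Bool.not_true]; rfl
  | false =>
    have hlow : PySem.Str.lower w = String.ofList (w.toList.map PySem.Chars.lowerChar) := by
      calc PySem.Str.lower w
          = String.ofList ((PySem.Str.lower w).toList) := String.ofList_toList.symm
        _ = String.ofList (w.toList.map PySem.Chars.lowerChar) := by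
            rw [PySem.Str.toList_lower]; rfl
    simp only [Bool.not_false]
    rw [hlow]
    simp

-- the two outer loops agree from any common accumulator
theorem pvFold_eq (ws : List String) (acc : List String)
    (h : ∀ x ∈ ws, pvDomStr x = true) :
    ws.foldl (fun result word =>
      let st := pvPunctuation.foldl (pvInnerStep word) ("", false)
      if !st.2 then
        let NewWord := word
        result ++ [PySem.Str.lower NewWord]
      else result) acc
    = ws.foldl (fun result word =>
      match pvScan word.toList [] with
      | some lowered => result ++ [String.ofList lowered]
      | none => result) acc := by
  induction ws generalizing acc with
  | nil => rfl
  | cons w ws ih =>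
    simp only [List.foldl_cons]
    rw [pvStep_eq w (h w (by simp)) acc]
    exact ih _ (fun x hx => h x (by simp [hx]))

-- ===== VERDICT =====
theorem Umbrella_spec : Claim_equal_Umbrella := by
  intro BunchWords hDom
  show Umbrella BunchWords = Umbrella_alt BunchWords
  unfold Dom_Umbrella at hDom
  simp only [List.all_eq_true] at hDom
  exact pvFold_eq BunchWords [] hDom
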